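-- pv_equiv track=rewrite | github.com/bcgov/foi-docreviewer | computingservices/DocumentServices/services/dts/redactionsummary.py | count_pages_per_doc
-- ===== SOURCE A (Python) =====
-- def count_pages_per_doc(mapped_flags):
--     page_counts = {}
--     #track pages per document
--     processed_pages = {}
--     for entry in mapped_flags:
--         doc_id = entry['docid']
--         page = entry['originalpageno']
--         if doc_id not in processed_pages:
--             processed_pages[doc_id] = set()
--         # If the page was already counted, skip it
--         if page in processed_pages[doc_id]:
--             continue
--         # Mark page as processed
--         processed_pages[doc_id].add(page)
--         # Count the page for the document
--         if doc_id in page_counts: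
--             page_counts[doc_id] += 1
--         else:
--             page_counts[doc_id] = 1
--
--     return page_counts
-- ===== SOURCE B (Python) =====
-- def count_pages_per_doc(mapped_flags):
--     # Phase 1: reduce the stream to its unique (docid, page) pairs, first occurrences in order.
--     unique = list(dict.fromkeys((e['docid'], e['originalpageno']) for e in mapped_flags))
--     # Phase 2: count unique pairs per document, documents in first-appearance order.
--     docs = list(dict.fromkeys(d for d, _ in unique))
--     return {d: sum(1 for dd, _ in unique if dd == d) for d in docs}
-- ===== Notes on version B (the rewrite author's own statement) =====
-- stated objective: alternative
-- what changed: A dedups and counts simultaneously with two parallel dicts (a per-doc page set and a running counter with increment branches); B instead dedups the whole stream to its unique (docid, page) pairs via dict.fromkeys and then counts pairs per document with a separate per-doc scan, maintaining no per-doc sets and no running counter.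
import Mathlib
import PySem

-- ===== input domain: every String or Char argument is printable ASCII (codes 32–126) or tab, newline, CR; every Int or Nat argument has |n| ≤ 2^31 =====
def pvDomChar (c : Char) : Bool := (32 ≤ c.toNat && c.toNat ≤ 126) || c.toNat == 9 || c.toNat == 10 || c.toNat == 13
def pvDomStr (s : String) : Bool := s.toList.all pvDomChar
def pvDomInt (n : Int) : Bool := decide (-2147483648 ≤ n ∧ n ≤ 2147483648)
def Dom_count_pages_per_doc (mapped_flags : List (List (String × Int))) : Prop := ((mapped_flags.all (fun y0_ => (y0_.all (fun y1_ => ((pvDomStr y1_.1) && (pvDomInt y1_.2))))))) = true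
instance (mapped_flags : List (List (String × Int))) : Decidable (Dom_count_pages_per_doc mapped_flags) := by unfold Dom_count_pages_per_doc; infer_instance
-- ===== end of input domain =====

-- B replaces A's one-pass dedup-and-count (per-doc page sets plus a running counter) by a global
-- dedup of the (docid, page) pairs followed by a separate per-document counting scan; objective: alternative.

-- entry['docid'], entry['originalpageno'] (shared by both Pythons; none = KeyError, excluded by Pre_)
def pvGetEntry (entry : List (String × Int)) : Option (Int × Int) :=
  match (PySem.Dict.ofList entry).get? "docid", (PySem.Dict.ofList entry).get? "originalpageno" with
  | some d, some p => some (d, p)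
  | _, _ => none

-- ===== PORT A =====
-- the loop body of A on one (doc_id, page) pair
def pvStepP (st : PySem.Dict Int Int × PySem.Dict Int (PySem.Set Int)) (dp : Int × Int) :
    PySem.Dict Int Int × PySem.Dict Int (PySem.Set Int) :=
  let doc_id := dp.1
  let page := dp.2
  let counts := st.1
  let processed := st.2
  let processed := if processed.contains doc_id then processed else processed.insert doc_id PySem.Set.empty
  let s := processed.getD doc_id PySem.Set.empty
  if PySem.Set.contains s page then (counts, processed)
  else
    let processed := processed.insert doc_id (PySem.Set.add s page)
    let counts := if counts.contains doc_id then counts.insert doc_id (counts.getD doc_id 0 + 1)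
                  else counts.insert doc_id 1
    (counts, processed)

def pvStepA (st : PySem.Dict Int Int × PySem.Dict Int (PySem.Set Int)) (entry : List (String × Int)) :
    PySem.Dict Int Int × PySem.Dict Int (PySem.Set Int) :=
  match pvGetEntry entry with
  | none => st
  | some dp => pvStepP st dp

def count_pages_per_doc (mapped_flags : List (List (String × Int))) : List (Int × Int) :=
  ((mapped_flags.foldl pvStepA (PySem.Dict.empty, PySem.Dict.empty)).1).items

-- ===== PORT B =====
-- unique = list(dict.fromkeys(...)); docs = list(dict.fromkeys(d for d, _ in unique));
-- {d: sum(1 for dd, _ in unique if dd == d) for d in docs}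
def count_pages_per_doc_alt (mapped_flags : List (List (String × Int))) : List (Int × Int) :=
  (PySem.List.dedup ((PySem.List.dedup (mapped_flags.filterMap pvGetEntry)).map (fun q => q.1))).map
    (fun d => (d, ((PySem.List.dedup (mapped_flags.filterMap pvGetEntry)).countP (fun q => q.1 == d) : Int)))

-- ===== PRECONDITION & SPEC =====
-- Pre_ excludes exactly the entries missing key 'docid' or 'originalpageno', on which the Python raises KeyError.
def Pre_count_pages_per_doc (mapped_flags : List (List (String × Int))) : Prop :=
  ∀ entry ∈ mapped_flags, (PySem.Dict.ofList entry).contains "docid" = true ∧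
    (PySem.Dict.ofList entry).contains "originalpageno" = true
instance (mapped_flags : List (List (String × Int))) : Decidable (Pre_count_pages_per_doc mapped_flags) := by
  unfold Pre_count_pages_per_doc; infer_instance
def pvWitness_count_pages_per_doc : (List (List (String × Int))) :=
  [[("docid", 1), ("originalpageno", 2)], [("docid", 1), ("originalpageno", 2)]]

def Spec_count_pages_per_doc (mapped_flags : List (List (String × Int))) (out : List (Int × Int)) : Prop := out = count_pages_per_doc_alt mapped_flags
instance (mapped_flags : List (List (String × Int))) (out : List (Int × Int)) : Decidable (Spec_count_pages_per_doc mapped_flags out) := by unfold Spec_count_pages_per_doc; infer_instance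

-- ===== CLAIM (what is proved, stated in full; the proofs are below) =====
def Claim_equal_count_pages_per_doc : Prop := ∀ (mapped_flags : List (List (String × Int))), Dom_count_pages_per_doc mapped_flags → Pre_count_pages_per_doc mapped_flags → Spec_count_pages_per_doc mapped_flags (count_pages_per_doc mapped_flags)

-- ===== LEMMAS AND PROOFS =====

-- pages of document d occurring in the pair list, in order, with duplicates
def pvPages (l : List (Int × Int)) (d : Int) : List Int :=
  l.filterMap (fun q => if q.1 = d then some q.2 else none)

-- the distinct docids of the pair list, first occurrences in order
def pvDocs (l : List (Int × Int)) : List Int := PySem.List.dedup (l.map (fun q => q.1))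

-- A's loop state after processing the pair list l
def pvInv (l : List (Int × Int)) (st : PySem.Dict Int Int × PySem.Dict Int (PySem.Set Int)) : Prop :=
  st.1.items = (pvDocs l).map (fun d => (d, PySem.Set.len (PySem.Set.ofList (pvPages l d)))) ∧
  st.2.items = (pvDocs l).map (fun d => (d, PySem.Set.ofList (pvPages l d)))

lemma pvFoldA_filterMap (l : List (List (String × Int)))
    (st : PySem.Dict Int Int × PySem.Dict Int (PySem.Set Int)) :
    l.foldl pvStepA st = (l.filterMap pvGetEntry).foldl pvStepP st := by
  induction l generalizing st with
  | nil => rfl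
  | cons e t ih =>
    simp only [List.foldl_cons, List.filterMap_cons, pvStepA]
    cases pvGetEntry e <;> simp [ih]

lemma pvOfList_append {α : Type} [BEq α] (l : List α) (x : α) :
    PySem.Set.ofList (l ++ [x]) = PySem.Set.add (PySem.Set.ofList l) x := by
  simp [PySem.Set.ofList_eq_foldl]

lemma pvDedup_append {α : Type} [BEq α] (l : List α) (x : α) :
    PySem.List.dedup (l ++ [x]) = PySem.Set.add (PySem.List.dedup l) x := by
  simp [PySem.List.dedup_eq_ofList, pvOfList_append]

lemma pvPages_append (l : List (Int × Int)) (x : Int × Int) (d : Int) :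
    pvPages (l ++ [x]) d = pvPages l d ++ (if x.1 = d then [x.2] else []) := by
  simp only [pvPages, List.filterMap_append, List.filterMap_cons, List.filterMap_nil]
  split_ifs <;> rfl

lemma pvMem_pages (l : List (Int × Int)) (d p : Int) : p ∈ pvPages l d ↔ (d, p) ∈ l := by
  simp only [pvPages, List.mem_filterMap]
  constructor
  · rintro ⟨⟨a, b⟩, hq, h⟩
    by_cases h1 : a = d
    · subst h1
      simp at h
      subst h
      exact hq
    · simp [h1] at h
  · intro h; exact ⟨(d, p), h, by simp⟩

lemma pvMem_dedup {α : Type} [BEq α] [LawfulBEq α] (l : List α) (x : α) :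
    x ∈ PySem.List.dedup l ↔ x ∈ l := by
  rw [PySem.List.dedup_eq_ofList, PySem.Set.mem_ofList]

-- dedup of the first components of the deduped pair list = dedup of the first components
lemma pvDedup_map_dedup {α β : Type} [BEq α] [LawfulBEq α] [BEq β] [LawfulBEq β]
    (l : List α) (f : α → β) :
    PySem.List.dedup ((PySem.List.dedup l).map f) = PySem.List.dedup (l.map f) := by
  induction l using List.reverseRecOn with
  | nil => rfl
  | append_singleton t x ih =>
    rw [pvDedup_append, List.map_append, List.map_singleton, pvDedup_append]
    by_cases hx : x ∈ PySem.List.dedup t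
    · rw [PySem.Set.add_of_mem hx, ih, PySem.Set.add_of_mem]
      rw [pvMem_dedup]
      exact List.mem_map_of_mem ((pvMem_dedup t x).mp hx)
    · rw [PySem.Set.add_of_not_mem hx, List.map_append, List.map_singleton, pvDedup_append, ih]

-- the unique pairs with docid d are exactly (d, ·) over the distinct pages of d
lemma pvFilter_dedup (l : List (Int × Int)) (d : Int) :
    (PySem.List.dedup l).filter (fun q => q.1 == d) =
      (PySem.Set.ofList (pvPages l d)).map (fun p => (d, p)) := by
  induction l using List.reverseRecOn with
  | nil => rfl
  | append_singleton t x ih =>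
    rw [pvDedup_append, pvPages_append]
    by_cases hd : x.1 = d
    · rw [if_pos hd, pvOfList_append]
      by_cases hp : x.2 ∈ PySem.Set.ofList (pvPages t d)
      · have hxt : x ∈ PySem.List.dedup t := by
          rw [pvMem_dedup]
          have := (pvMem_pages t d x.2).mp ((PySem.Set.mem_ofList _ _).mp hp)
          rwa [← hd, Prod.mk.eta] at this
        rw [PySem.Set.add_of_mem hxt, PySem.Set.add_of_mem hp, ih]
      · have hxt : x ∉ PySem.List.dedup t := by
          rw [pvMem_dedup]
          intro hc
          apply hp
          rw [PySem.Set.mem_ofList, pvMem_pages]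
          rwa [← hd, Prod.mk.eta]
        rw [PySem.Set.add_of_not_mem hxt, PySem.Set.add_of_not_mem hp,
            List.filter_append, ih, List.map_append]
        congr 1
        have hx : x = (d, x.2) := Prod.ext_iff.mpr ⟨hd, rfl⟩
        simp only [List.filter, hd, beq_self_eq_true]
        exact congrArg (· :: []) hx
    · rw [if_neg hd, List.append_nil]
      by_cases hxt : x ∈ PySem.List.dedup t
      · rw [PySem.Set.add_of_mem hxt, ih]
      · rw [PySem.Set.add_of_not_mem hxt, List.filter_append, ih]
        have : List.filter (fun q => q.1 == d) [x] = [] := by simp [hd]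
        rw [this, List.append_nil]

lemma pvCountP_dedup (l : List (Int × Int)) (d : Int) :
    ((PySem.List.dedup l).countP (fun q => q.1 == d) : Int) =
      PySem.Set.len (PySem.Set.ofList (pvPages l d)) := by
  rw [List.countP_eq_length_filter, pvFilter_dedup, PySem.Set.len]
  simp

lemma pvDocs_nodup (l : List (Int × Int)) : (pvDocs l).Nodup := by
  rw [pvDocs, PySem.List.dedup_eq_ofList]; exact PySem.Set.nodup_ofList _

lemma pvKeys_of_items {ν : Type} (d : PySem.Dict Int ν) (D : List Int) (f : Int → ν)
    (h : d.items = D.map (fun k => (k, f k))) : d.keys = D := by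
  simp [PySem.Dict.keys, h, List.map_map, Function.comp_def]

-- the step preserves the invariant
lemma pvStep_inv (l : List (Int × Int)) (st : PySem.Dict Int Int × PySem.Dict Int (PySem.Set Int))
    (dp : Int × Int) (h : pvInv l st) : pvInv (l ++ [dp]) (pvStepP st dp) := by
  obtain ⟨c, proc⟩ := st
  obtain ⟨d, p⟩ := dp
  obtain ⟨hc, hproc⟩ := h
  have hDnd := pvDocs_nodup l
  have hckeys : c.keys = pvDocs l := pvKeys_of_items c _ _ hc
  have hpkeys : proc.keys = pvDocs l := pvKeys_of_items proc _ _ hproc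
  have hcknd : c.keys.Nodup := by rw [hckeys]; exact hDnd
  have hpknd : proc.keys.Nodup := by rw [hpkeys]; exact hDnd
  have hccont : c.contains d = decide (d ∈ pvDocs l) := by
    rw [PySem.Dict.contains_eq_decide_mem_keys, hckeys]
  have hpcont : proc.contains d = decide (d ∈ pvDocs l) := by
    rw [PySem.Dict.contains_eq_decide_mem_keys, hpkeys]
  have hDocs : pvDocs (l ++ [(d, p)]) = PySem.Set.add (pvDocs l) d := by
    simp only [pvDocs, List.map_append, List.map_cons, List.map_nil]
    exact pvDedup_append _ _
  have hPagesNe : ∀ d', d' ≠ d → pvPages (l ++ [(d, p)]) d' = pvPages l d' := by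
    intro d' hne
    rw [pvPages_append]
    simp [Ne.symm hne]
  have hPagesEq : pvPages (l ++ [(d, p)]) d = pvPages l d ++ [p] := by
    rw [pvPages_append]; simp
  by_cases hdin : d ∈ pvDocs l
  · -- existing document
    have hDsame : pvDocs (l ++ [(d, p)]) = pvDocs l := by
      rw [hDocs, PySem.Set.add_of_mem hdin]
    have hpc : proc.contains d = true := by rw [hpcont]; simpa
    have hcc : c.contains d = true := by rw [hccont]; simpa
    have hgetD : proc.getD d PySem.Set.empty = PySem.Set.ofList (pvPages l d) := by
      apply PySem.Dict.getD_of_mem_items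
      · rw [hproc]; exact List.mem_map_of_mem hdin
      · exact hpknd
    have hcgetD : c.getD d 0 = PySem.Set.len (PySem.Set.ofList (pvPages l d)) := by
      apply PySem.Dict.getD_of_mem_items
      · rw [hc]; exact List.mem_map_of_mem hdin
      · exact hcknd
    simp only [pvStepP, hpc, if_true, hgetD]
    by_cases hpin : PySem.Set.contains (PySem.Set.ofList (pvPages l d)) p = true
    · -- duplicate page: nothing changes
      have hmem : p ∈ PySem.Set.ofList (pvPages l d) := (PySem.Set.contains_iff _ _).mp hpin
      have hSsame : PySem.Set.ofList (pvPages (l ++ [(d, p)]) d) = PySem.Set.ofList (pvPages l d) := by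
        rw [hPagesEq, pvOfList_append, PySem.Set.add_of_mem hmem]
      rw [if_pos hpin]
      constructor
      · rw [hc, hDsame]
        apply List.map_congr_left
        intro d' hd'
        by_cases hdd : d' = d
        · subst hdd; rw [hSsame]
        · rw [hPagesNe d' hdd]
      · rw [hproc, hDsame]
        apply List.map_congr_left
        intro d' hd'
        by_cases hdd : d' = d
        · subst hdd; rw [hSsame]
        · rw [hPagesNe d' hdd]
    · -- new page of an existing document
      have hnotmem : p ∉ PySem.Set.ofList (pvPages l d) := fun hm =>
        hpin ((PySem.Set.contains_iff _ _).mpr hm)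
      have hSnew : PySem.Set.ofList (pvPages (l ++ [(d, p)]) d) =
          PySem.Set.ofList (pvPages l d) ++ [p] := by
        rw [hPagesEq, pvOfList_append, PySem.Set.add_of_not_mem hnotmem]
      rw [if_neg hpin]
      simp only [hcc, if_true]
      constructor
      · rw [PySem.Dict.items_insert_of_contains _ _ hcc, hc, hDsame, List.map_map]
        apply List.map_congr_left
        intro d' hd'
        by_cases hdd : d' = d
        · subst hdd
          simp only [Function.comp, beq_self_eq_true, if_true]
          rw [hSnew, hcgetD, PySem.Set.len, PySem.Set.len]
          simp
        · simp only [Function.comp]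
          rw [if_neg (by simpa using hdd), hPagesNe d' hdd]
      · rw [PySem.Dict.items_insert_of_contains _ _ hpc, hproc, hDsame, List.map_map]
        apply List.map_congr_left
        intro d' hd'
        by_cases hdd : d' = d
        · subst hdd
          simp only [Function.comp, beq_self_eq_true, if_true]
          rw [hSnew, PySem.Set.add_of_not_mem hnotmem]
        · simp only [Function.comp]
          rw [if_neg (by simpa using hdd), hPagesNe d' hdd]
  · -- fresh document
    have hDnew : pvDocs (l ++ [(d, p)]) = pvDocs l ++ [d] := by
      rw [hDocs, PySem.Set.add_of_not_mem hdin]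
    have hpc : proc.contains d = false := by rw [hpcont]; simpa
    have hcc : c.contains d = false := by rw [hccont]; simpa
    have hPagesEmpty : pvPages l d = [] := by
      rw [List.eq_nil_iff_forall_not_mem]
      intro q hq
      apply hdin
      rw [pvDocs, pvMem_dedup]
      exact List.mem_map_of_mem ((pvMem_pages l d q).mp hq)
    have hgetD : (proc.insert d PySem.Set.empty).getD d PySem.Set.empty = PySem.Set.empty :=
      PySem.Dict.getD_insert_self _ _ _ _
    simp only [pvStepP, hpc, Bool.false_eq_true, if_false, hgetD]
    rw [if_neg (by simp [PySem.Set.contains, PySem.Set.empty])]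
    simp only [hcc, Bool.false_eq_true, if_false]
    have hSnew : PySem.Set.ofList (pvPages (l ++ [(d, p)]) d) = [p] := by
      rw [hPagesEq, hPagesEmpty]; rfl
    have hins : (proc.insert d PySem.Set.empty).insert d (PySem.Set.add PySem.Set.empty p)
        = proc.insert d (PySem.Set.add PySem.Set.empty p) := PySem.Dict.insert_insert_self _ _ _ _
    constructor
    · rw [PySem.Dict.items_insert_of_not_contains _ _ hcc, hc, hDnew, List.map_append]
      congr 1
      · apply List.map_congr_left
        intro d' hd'
        have hdd : d' ≠ d := fun hh => hdin (hh ▸ hd')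
        rw [hPagesNe d' hdd]
      · simp [hSnew, PySem.Set.len]
    · rw [hins, PySem.Dict.items_insert_of_not_contains _ _ hpc, hproc, hDnew, List.map_append]
      congr 1
      · apply List.map_congr_left
        intro d' hd'
        have hdd : d' ≠ d := fun hh => hdin (hh ▸ hd')
        rw [hPagesNe d' hdd]
      · simp [hSnew]

lemma pvFold_inv (l : List (Int × Int)) :
    pvInv l (l.foldl pvStepP (PySem.Dict.empty, PySem.Dict.empty)) := by
  induction l using List.reverseRecOn with
  | nil => exact ⟨rfl, rfl⟩
  | append_singleton t x ih =>
    rw [List.foldl_append, List.foldl_cons, List.foldl_nil]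
    exact pvStep_inv t _ x ih

-- ===== VERDICT (by name: the statement is the Claim_ definition above) =====
theorem count_pages_per_doc_spec : Claim_equal_count_pages_per_doc := by
  intro mapped_flags _ _
  unfold Spec_count_pages_per_doc count_pages_per_doc count_pages_per_doc_alt
  rw [pvFoldA_filterMap]
  have h := (pvFold_inv (mapped_flags.filterMap pvGetEntry)).1
  rw [h, pvDedup_map_dedup, ← pvDocs]
  apply List.map_congr_left
  intro d hd
  rw [pvCountP_dedup]
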